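-- pv_equiv track=rewrite | github.com/zqwei/stock_tracker_and_action | src/portfolio_assistant/ingest/broker_exports_import.py | _resolve_source_column
-- ===== SOURCE A (Python) =====
-- def _normalize(text: str) -> str:
--     return " ".join(str(text).strip().lower().replace("_", " ").split())
--
-- def _resolve_source_column(source: str, columns: list[str] | None) -> tuple[str | None, str | None]:
--     source_text = str(source).strip()
--     if not source_text:
--         return None, "source column is empty"
--     if columns is None:
--         return source_text, None
--
--     exact_columns: dict[str, str] = {}
--     normalized_columns: dict[str, str] = {}
--     ambiguous_normalized: set[str] = set()
--     for column in columns: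
--         col_text = str(column)
--         exact_columns[col_text] = col_text
--         normalized_col = _normalize(col_text)
--         previous = normalized_columns.get(normalized_col)
--         if previous is None:
--             normalized_columns[normalized_col] = col_text
--         elif previous != col_text:
--             ambiguous_normalized.add(normalized_col)
--
--     if source_text in exact_columns:
--         return source_text, None
--
--     normalized_source = _normalize(source_text)
--     if normalized_source in ambiguous_normalized:
--         return None, f"source column '{source_text}' is ambiguous in the CSV"
--     resolved = normalized_columns.get(normalized_source)
--     if resolved is None:
--         return None, f"source column '{source_text}' is not present in the CSV"
--     return resolved, None
-- ===== SOURCE B (Python) =====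
-- def _normalize(text: str) -> str:
--     return " ".join(str(text).strip().lower().replace("_", " ").split())
--
--
-- def _resolve_source_column(source: str, columns: list[str] | None) -> tuple[str | None, str | None]:
--     source_text = str(source).strip()
--     if not source_text:
--         return None, "source column is empty"
--     if columns is None:
--         return source_text, None
--     if any(str(c) == source_text for c in columns):
--         return source_text, None
--     normalized_source = _normalize(source_text)
--     matches: set[str] = set()
--     for column in columns:
--         col_text = str(column)
--         if _normalize(col_text) == normalized_source:
--             matches.add(col_text)
--     if len(matches) > 1:
--         return None, f"source column '{source_text}' is ambiguous in the CSV"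
--     if not matches:
--         return None, f"source column '{source_text}' is not present in the CSV"
--     return next(iter(matches)), None
-- ===== Notes on version B (the rewrite author's own statement) =====
-- stated objective: simpler
-- what changed: Drops the three prebuilt index structures (exact dict, normalized->first dict, ambiguous set) built over all columns; after the guards B checks exact membership directly, then makes one pass collecting only the distinct column texts whose normalization equals the requested source's, deciding ambiguous/absent/resolved from that set's size.
import Mathlib
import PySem

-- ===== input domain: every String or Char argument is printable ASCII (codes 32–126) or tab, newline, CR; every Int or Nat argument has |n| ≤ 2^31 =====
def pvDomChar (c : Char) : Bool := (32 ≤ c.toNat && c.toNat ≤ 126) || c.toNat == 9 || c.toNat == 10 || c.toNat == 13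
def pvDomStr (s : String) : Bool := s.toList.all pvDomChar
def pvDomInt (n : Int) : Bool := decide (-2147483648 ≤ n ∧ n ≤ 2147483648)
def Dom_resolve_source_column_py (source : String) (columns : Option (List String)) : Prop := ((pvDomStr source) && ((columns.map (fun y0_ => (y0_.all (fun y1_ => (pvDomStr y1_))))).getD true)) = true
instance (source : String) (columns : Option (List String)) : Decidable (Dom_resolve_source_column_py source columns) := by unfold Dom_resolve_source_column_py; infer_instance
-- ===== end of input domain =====

-- B replaces A's three prebuilt index structures by a direct membership test and one
-- on-demand pass collecting the distinct column texts that normalize like the source (simpler).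

-- ===== PORT A =====
-- _normalize: " ".join(str(text).strip().lower().replace("_", " ").split())
def pyNormalize (text : String) : String :=
  PySem.Str.join " " (PySem.Str.split₀ (PySem.Str.replace (PySem.Str.lower (PySem.Str.strip text)) "_" " "))

-- loop body of A's `for column in columns` (state: exact_columns, normalized_columns, ambiguous_normalized)
def rscStep (st : PySem.Dict String String × PySem.Dict String String × PySem.Set String)
    (column : String) : PySem.Dict String String × PySem.Dict String String × PySem.Set String :=
  let exact := st.1.insert column column
  let nc := pyNormalize column
  match st.2.1.get? nc with
  | none => (exact, st.2.1.insert nc column, st.2.2)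
  | some previous =>
      if previous ≠ column then (exact, st.2.1, PySem.Set.add st.2.2 nc)
      else (exact, st.2.1, st.2.2)

def resolve_source_column_py (source : String) (columns : Option (List String)) :
    Option String × Option String :=
  let sourceText := PySem.Str.strip source
  if sourceText == "" then (none, some "source column is empty")
  else
    match columns with
    | none => (some sourceText, none)
    | some cols =>
      let st := cols.foldl rscStep (PySem.Dict.empty, PySem.Dict.empty, PySem.Set.empty)
      if st.1.contains sourceText then (some sourceText, none)
      else
        let normalizedSource := pyNormalize sourceText
        if PySem.Set.contains st.2.2 normalizedSource then
          (none, some ("source column '" ++ sourceText ++ "' is ambiguous in the CSV"))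
        else
          match st.2.1.get? normalizedSource with
          | none => (none, some ("source column '" ++ sourceText ++ "' is not present in the CSV"))
          | some resolved => (some resolved, none)

-- ===== PORT B =====
def resolve_source_column_py_alt (source : String) (columns : Option (List String)) :
    Option String × Option String :=
  let sourceText := PySem.Str.strip source
  if sourceText == "" then (none, some "source column is empty")
  else
    match columns with
    | none => (some sourceText, none)
    | some cols =>
      if cols.any (fun c => c == sourceText) then (some sourceText, none)
      else
        let normalizedSource := pyNormalize sourceText
        let matched : PySem.Set String :=
          cols.foldl (fun s c => if pyNormalize c == normalizedSource then PySem.Set.add s c else s)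
            PySem.Set.empty
        if 1 < PySem.Set.len matched then
          (none, some ("source column '" ++ sourceText ++ "' is ambiguous in the CSV"))
        else
          match matched with
          | [] => (none, some ("source column '" ++ sourceText ++ "' is not present in the CSV"))
          | c :: _ => (some c, none)

-- ===== PRECONDITION & SPEC =====
def Spec_resolve_source_column_py (source : String) (columns : Option (List String)) (out : Option String × Option String) : Prop := out = resolve_source_column_py_alt source columns
instance (source : String) (columns : Option (List String)) (out : Option String × Option String) : Decidable (Spec_resolve_source_column_py source columns out) := by unfold Spec_resolve_source_column_py; infer_instance

-- ===== CLAIM (what is proved, stated in full; the proofs are below) =====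
def Claim_equal_resolve_source_column_py : Prop := ∀ (source : String) (columns : Option (List String)), Dom_resolve_source_column_py source columns → Spec_resolve_source_column_py source columns (resolve_source_column_py source columns)

-- ===== LEMMAS AND PROOFS =====

-- the exact/first-normalized/ambiguous state of A's loop at key ns, as a function of the
-- already-stored first match (o) and the remaining columns that normalize to ns
def ambAfter (o : Option String) : List String → Bool
  | [] => false
  | c :: rest =>
    match o with
    | none => ambAfter (some c) rest
    | some p => (!(p == c)) || ambAfter (some p) rest

lemma rscStep_none (e n : PySem.Dict String String) (a : PySem.Set String) (c : String)
    (h : n.get? (pyNormalize c) = none) :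
    rscStep (e, n, a) c = (e.insert c c, n.insert (pyNormalize c) c, a) := by
  simp [rscStep, h]

lemma rscStep_some_ne (e n : PySem.Dict String String) (a : PySem.Set String) (c p : String)
    (h : n.get? (pyNormalize c) = some p) (hp : p ≠ c) :
    rscStep (e, n, a) c = (e.insert c c, n, PySem.Set.add a (pyNormalize c)) := by
  simp [rscStep, h, hp]

lemma rscStep_some_eq (e n : PySem.Dict String String) (a : PySem.Set String) (c : String)
    (h : n.get? (pyNormalize c) = some c) :
    rscStep (e, n, a) c = (e.insert c c, n, a) := by
  simp [rscStep, h]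

lemma rsc_fold_fst : ∀ (l : List String) (e n : PySem.Dict String String) (a : PySem.Set String),
    (l.foldl rscStep (e, n, a)).1 = l.foldl (fun d c => d.insert c c) e := by
  intro l
  induction l with
  | nil => intro e n a; rfl
  | cons c rest ih =>
    intro e n a
    rw [List.foldl_cons, List.foldl_cons]
    cases h : n.get? (pyNormalize c) with
    | none => rw [rscStep_none e n a c h]; exact ih _ _ _
    | some p =>
      by_cases hp : p = c
      · subst hp; rw [rscStep_some_eq e n a p h]; exact ih _ _ _
      · rw [rscStep_some_ne e n a c p h hp]; exact ih _ _ _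

lemma rsc_fold_snd (ns : String) : ∀ (l : List String) (e n : PySem.Dict String String) (a : PySem.Set String),
    (l.foldl rscStep (e, n, a)).2.1.get? ns
      = (n.get? ns).or (l.filter (fun c => pyNormalize c == ns)).head?
    ∧ ((ns ∈ (l.foldl rscStep (e, n, a)).2.2)
      ↔ (ns ∈ a ∨ ambAfter (n.get? ns) (l.filter (fun c => pyNormalize c == ns)) = true)) := by
  intro l
  induction l with
  | nil => intro e n a; simp [ambAfter]
  | cons c rest ih =>
    intro e n a
    rw [List.foldl_cons, List.filter_cons]
    by_cases hc : pyNormalize c = ns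
    · subst hc
      simp only [beq_self_eq_true, if_pos]
      cases h : n.get? (pyNormalize c) with
      | none =>
        rw [rscStep_none e n a c h]
        obtain ⟨h1, h2⟩ := ih (e.insert c c) (n.insert (pyNormalize c) c) a
        rw [PySem.Dict.get?_insert_self] at h1 h2
        refine ⟨?_, ?_⟩
        · rw [h1]; simp
        · rw [h2]; simp [ambAfter]
      | some p =>
        by_cases hp : p = c
        · subst hp
          rw [rscStep_some_eq e n a p h]
          obtain ⟨h1, h2⟩ := ih (e.insert p p) n a
          refine ⟨?_, ?_⟩
          · rw [h1, h]; simp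
          · rw [h2, h]; simp [ambAfter]
        · rw [rscStep_some_ne e n a c p h hp]
          obtain ⟨h1, h2⟩ := ih (e.insert c c) n (PySem.Set.add a (pyNormalize c))
          refine ⟨?_, ?_⟩
          · rw [h1, h]; simp
          · rw [h2, h]
            simp [PySem.Set.mem_add, ambAfter, hp]
    · have hc' : (pyNormalize c == ns) = false := by simp [hc]
      simp only [hc', Bool.false_eq_true, if_false]
      cases h : n.get? (pyNormalize c) with
      | none =>
        rw [rscStep_none e n a c h]
        obtain ⟨h1, h2⟩ := ih (e.insert c c) (n.insert (pyNormalize c) c) a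
        have hins : (n.insert (pyNormalize c) c).get? ns = n.get? ns :=
          PySem.Dict.get?_insert_of_ne _ _ (Ne.symm hc)
        rw [hins] at h1 h2
        exact ⟨h1, h2⟩
      | some p =>
        by_cases hp : p = c
        · subst hp
          rw [rscStep_some_eq e n a p h]
          exact ih _ _ _
        · rw [rscStep_some_ne e n a c p h hp]
          obtain ⟨h1, h2⟩ := ih (e.insert c c) n (PySem.Set.add a (pyNormalize c))
          refine ⟨h1, ?_⟩
          rw [h2]
          have hne : ns ≠ pyNormalize c := Ne.symm hc
          simp [PySem.Set.mem_add, hne]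

lemma alt_fold_matches (ns : String) : ∀ (l : List String) (s : PySem.Set String),
    l.foldl (fun s c => if pyNormalize c == ns then PySem.Set.add s c else s) s
      = (l.filter (fun c => pyNormalize c == ns)).foldl PySem.Set.add s := by
  intro l
  induction l with
  | nil => intro s; simp
  | cons c rest ih =>
    intro s
    rw [List.foldl_cons, List.filter_cons]
    by_cases hc : (pyNormalize c == ns) = true
    · rw [hc]
      simp only [if_true]
      rw [List.foldl_cons]
      exact ih _
    · rw [Bool.not_eq_true] at hc
      rw [hc]
      simp only [Bool.false_eq_true, if_false]
      exact ih _

lemma ambAfter_false_of_all (p : String) : ∀ (rest : List String), rest.all (fun d => d == p) →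
    ambAfter (some p) rest = false := by
  intro rest
  induction rest with
  | nil => intro _; rfl
  | cons d t ih =>
    intro h
    simp only [List.all_cons, Bool.and_eq_true, beq_iff_eq] at h
    obtain ⟨rfl, ht⟩ := h
    simp [ambAfter, ih ht]

lemma ambAfter_true_of_ne (p d : String) : ∀ (rest : List String), d ∈ rest → d ≠ p →
    ambAfter (some p) rest = true := by
  intro rest
  induction rest with
  | nil => intro h; simp at h
  | cons x t ih =>
    intro hm hne
    rcases List.mem_cons.mp hm with rfl | hm
    · simp [ambAfter, Ne.symm hne]
    · simp [ambAfter, ih hm hne]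

lemma ofList_all_eq (c : String) : ∀ (rest : List String), rest.all (fun d => d == c) →
    PySem.Set.ofList (c :: rest) = [c] := by
  intro rest h
  rw [PySem.Set.ofList_cons]
  have : PySem.Set.discard (PySem.Set.ofList rest) c = [] := by
    apply List.eq_nil_iff_forall_not_mem.mpr
    intro y hy
    rw [PySem.Set.mem_discard] at hy
    obtain ⟨hy1, hy2⟩ := hy
    rw [PySem.Set.mem_ofList] at hy1
    have := List.all_eq_true.mp h y hy1
    simp_all
  rw [this]

lemma one_lt_length_of_two_mem {l : List String} {x y : String} (hx : x ∈ l) (hy : y ∈ l)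
    (hne : x ≠ y) : 1 < l.length := by
  cases l with
  | nil => simp at hx
  | cons a t =>
    cases t with
    | nil => simp_all
    | cons b u => simp

-- ===== VERDICT (by name: the statement is the Claim_ definition above) =====
theorem resolve_source_column_py_spec : Claim_equal_resolve_source_column_py := by
  intro source columns _
  unfold Spec_resolve_source_column_py resolve_source_column_py resolve_source_column_py_alt
  set st := PySem.Str.strip source with hst
  by_cases hempty : (st == "") = true
  · simp [hempty]
  · simp only [hempty, Bool.false_eq_true, if_false]
    match columns with
    | none => rfl
    | some cols =>
      simp only []
      set ns := pyNormalize st with hns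
      -- exact membership
      have hfst := rsc_fold_fst cols PySem.Dict.empty PySem.Dict.empty (PySem.Set.empty : PySem.Set String)
      have hkeys : (cols.foldl rscStep (PySem.Dict.empty, PySem.Dict.empty, (PySem.Set.empty : PySem.Set String))).1.contains st
          = cols.any (fun c => c == st) := by
        rw [hfst, PySem.Dict.contains_eq_decide_mem_keys, PySem.Dict.keys_foldl_insert]
        simp only [PySem.Dict.keys_empty, PySem.Set.update_nil_left]
        rcases h : cols.any (fun c => c == st) with _ | _
        · simp only [List.any_eq_false] at h
          simp only [decide_eq_false_iff_not, PySem.Set.mem_ofList]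
          intro hm; exact absurd (by simp) (h st hm)
        · simp only [List.any_eq_true] at h
          obtain ⟨c, hc, hceq⟩ := h
          have : c = st := by simpa using hceq
          subst this
          simp [PySem.Set.mem_ofList, hc]
      rw [hkeys]
      by_cases hex : cols.any (fun c => c == st) = true
      · simp [hex]
      · simp only [hex, Bool.false_eq_true, if_false]
        obtain ⟨hget, hamb⟩ := rsc_fold_snd ns cols PySem.Dict.empty PySem.Dict.empty (PySem.Set.empty : PySem.Set String)
        rw [alt_fold_matches]
        have hof : (cols.filter (fun c => pyNormalize c == ns)).foldl PySem.Set.add (PySem.Set.empty : PySem.Set String)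
            = PySem.Set.ofList (cols.filter (fun c => pyNormalize c == ns)) := by
          rw [PySem.Set.ofList_eq_foldl]; rfl
        rw [hof]
        simp only [PySem.Dict.get?_empty, Option.or] at hget
        cases hF : cols.filter (fun c => pyNormalize c == ns) with
        | nil =>
          rw [hF] at hget hamb
          have hcf : PySem.Set.contains (cols.foldl rscStep (PySem.Dict.empty, PySem.Dict.empty, (PySem.Set.empty : PySem.Set String))).2.2 ns = false := by
            rcases h : PySem.Set.contains _ ns with _ | _
            · rfl
            · have := hamb.mp ((PySem.Set.contains_iff _ _).mp h)
              simp [ambAfter] at this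
          rw [hcf, hget]
          simp [PySem.Set.len_eq, PySem.Set.ofList_nil]
        | cons c rest =>
          rw [hF] at hget hamb
          by_cases hall : rest.all (fun d => d == c) = true
          · -- unique surviving match: both resolve to the first (= only distinct) match c
            have hcf : PySem.Set.contains (cols.foldl rscStep (PySem.Dict.empty, PySem.Dict.empty, (PySem.Set.empty : PySem.Set String))).2.2 ns = false := by
              rcases h : PySem.Set.contains _ ns with _ | _
              · rfl
              · have := hamb.mp ((PySem.Set.contains_iff _ _).mp h)
                simp only [ambAfter] at this
                rw [ambAfter_false_of_all c rest hall] at this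
                simp at this
            rw [hcf, hget, ofList_all_eq c rest hall]
            simp [PySem.Set.len_eq]
          · -- ambiguous: a later match distinct from the first
            simp only [List.all_eq_true, not_forall] at hall
            obtain ⟨d, hd, hdc⟩ := hall
            have hdc' : d ≠ c := by simpa using hdc
            have hcT : PySem.Set.contains (cols.foldl rscStep (PySem.Dict.empty, PySem.Dict.empty, (PySem.Set.empty : PySem.Set String))).2.2 ns = true := by
              apply (PySem.Set.contains_iff _ _).mpr
              apply hamb.mpr
              right
              simp only [ambAfter]
              exact ambAfter_true_of_ne c d rest hd hdc'
            rw [hcT]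
            have hlen : 1 < PySem.Set.len (PySem.Set.ofList (c :: rest)) := by
              have hc1 : c ∈ PySem.Set.ofList (c :: rest) := by
                rw [PySem.Set.mem_ofList]; simp
              have hdm : d ∈ PySem.Set.ofList (c :: rest) := by
                rw [PySem.Set.mem_ofList]; simp [hd]
              rw [PySem.Set.len_eq]
              exact_mod_cast one_lt_length_of_two_mem hc1 hdm (Ne.symm hdc')
            rw [if_pos hlen]
            simp
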